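-- pv_equiv track=rewrite | github.com/Fafafa12/hackeron | 7-Circular Palindromes.py | circularPalindromes
-- ===== SOURCE A (Python) =====
-- def circularPalindromes(s):
--     # Write your code here
--     n = len(s)
--     # circularList = [s[i:n] + s[0:i] for i in range(n)]
--     result = []
--     for y in range(n):
--         pal = s[y:n] + s[0:y]
--         max = 0
--         for i in range(n):
--             if len(pal[i:n]) > max:
--                 for j in range(0, n-i):
--                     t = pal[i:(n-j)]
--                     if (max < len(t)):
--                         if t == t[::-1]:
--                             max = len(t)
--                             break
--                     else:
--                         break
--             else:
--                 break
--         result.append(max)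
--     return result
-- ===== SOURCE B (Python) =====
-- def circularPalindromes(s):
--     n = len(s)
--     result = []
--     for y in range(n):
--         pal = s[y:] + s[:y]
--         L = n
--         while L > 0 and not any(pal[i:i+L] == pal[i:i+L][::-1] for i in range(n - L + 1)):
--             L -= 1
--         result.append(L)
--     return result
-- ===== Notes on version B (the rewrite author's own statement) =====
-- stated objective: simpler
-- what changed: B replaces A's start-major triple loop with running maximum and break logic by a length-major scan per rotation: try lengths n down to 1 and return the first length for which any window of that length is a palindrome.
import Mathlib
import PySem

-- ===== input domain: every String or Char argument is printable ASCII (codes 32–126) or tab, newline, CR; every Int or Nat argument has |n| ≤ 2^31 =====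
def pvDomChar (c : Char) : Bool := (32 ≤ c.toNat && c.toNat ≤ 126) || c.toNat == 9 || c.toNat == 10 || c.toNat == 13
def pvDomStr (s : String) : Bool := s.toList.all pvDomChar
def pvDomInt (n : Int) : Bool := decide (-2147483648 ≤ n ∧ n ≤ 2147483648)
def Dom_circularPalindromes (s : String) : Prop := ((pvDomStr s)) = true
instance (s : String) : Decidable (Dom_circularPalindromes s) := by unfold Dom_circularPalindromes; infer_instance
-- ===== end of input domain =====

-- B changes A's start-major nested loops (running max, break logic) into a length-major
-- descending scan per rotation; the objective is a simpler implementation (not faster).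

-- ===== PORT A =====
-- inner j-loop: for j in range(0, n-i): t = pal[i:(n-j)]; …   (c = n-i-j counts the remaining iterations)
def pvAInner (pal : List Char) (n i : Nat) : Nat → Nat → Nat → Nat
  | 0, _, mx => mx
  | c + 1, j, mx =>
    if j < n - i then
      let t := PySem.List.slice pal (some (i : Int)) (some ((n - j : Nat) : Int))
      if mx < t.length then
        if t == t.reverse then t.length          -- t == t[::-1] (PySem.List.slice?_none_none_neg_one)
        else pvAInner pal n i c (j + 1) mx
      else mx
    else mx

-- outer i-loop with its break when len(pal[i:n]) ≤ max   (k = n-i counts the remaining iterations)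
def pvAOuter (pal : List Char) (n : Nat) : Nat → Nat → Nat → Nat
  | 0, _, mx => mx
  | k + 1, i, mx =>
    if i < n then
      if (PySem.List.slice pal (some (i : Int)) (some (n : Int))).length > mx then
        pvAOuter pal n k (i + 1) (pvAInner pal n i (n - i) 0 mx)
      else mx
    else mx

def circularPalindromes (s : String) : List Int :=
  let cs := s.toList
  let n := cs.length
  (List.range n).map (fun (y : Nat) =>
    let pal := PySem.List.slice cs (some (y : Int)) (some (n : Int)) ++
               PySem.List.slice cs (some (0 : Int)) (some (y : Int))
    (pvAOuter pal n n 0 0 : Int))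

-- ===== PORT B =====
-- while L > 0 and not any(pal[i:i+L] == pal[i:i+L][::-1] for i in range(n-L+1)): L -= 1
def pvBDescend (pal : List Char) (n : Nat) : Nat → Nat
  | 0 => 0
  | L + 1 =>
    if (List.range (n - (L + 1) + 1)).any (fun (i : Nat) =>
        let t := PySem.List.slice pal (some (i : Int)) (some ((i + (L + 1) : Nat) : Int))
        t == t.reverse)
    then L + 1
    else pvBDescend pal n L

def circularPalindromes_alt (s : String) : List Int :=
  let cs := s.toList
  let n := cs.length
  (List.range n).map (fun (y : Nat) =>
    let pal := PySem.List.slice cs (some (y : Int)) none ++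
               PySem.List.slice cs none (some (y : Int))
    (pvBDescend pal n n : Int))

-- ===== PRECONDITION & SPEC =====
def Spec_circularPalindromes (s : String) (out : List Int) : Prop := out = circularPalindromes_alt s
instance (s : String) (out : List Int) : Decidable (Spec_circularPalindromes s out) := by unfold Spec_circularPalindromes; infer_instance

-- ===== CLAIM (what is proved, stated in full; the proofs are below) =====
def Claim_equal_circularPalindromes : Prop := ∀ (s : String), Dom_circularPalindromes s → Spec_circularPalindromes s (circularPalindromes s)

-- ===== LEMMAS AND PROOFS =====

-- the window pal[i:i+L] and its palindrome test
def pvSeg (pal : List Char) (i L : Nat) : List Char := (pal.drop i).take L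
def pvPP (pal : List Char) (i L : Nat) : Bool := pvSeg pal i L == (pvSeg pal i L).reverse

-- greatest L' ≤ c with pvPP pal i L' (0 if none): what A's inner loop finds at start i
def pvBest1 (pal : List Char) (i : Nat) : Nat → Nat
  | 0 => 0
  | c + 1 => if pvPP pal i (c + 1) then c + 1 else pvBest1 pal i c

-- max over start positions i' ≥ i of pvBest1: what A's outer loop accumulates
def pvBestFrom (pal : List Char) (i : Nat) : Nat :=
  if i < pal.length then max (pvBest1 pal i (pal.length - i)) (pvBestFrom pal (i + 1)) else 0
termination_by pal.length - i

-- greatest L' ≤ c with a palindromic window of length L' anywhere: what B's scan finds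
def pvBestLe (pal : List Char) : Nat → Nat
  | 0 => 0
  | L + 1 => if (List.range (pal.length - (L + 1) + 1)).any (fun i => pvPP pal i (L + 1)) then L + 1
             else pvBestLe pal L

theorem pvBest1_le (pal : List Char) (i c : Nat) : pvBest1 pal i c ≤ c := by
  induction c with
  | zero => simp [pvBest1]
  | succ c ih => simp only [pvBest1]; split <;> omega

theorem pvBest1_ge (pal : List Char) (i L c : Nat) (hL : pvPP pal i L = true) (hc : L ≤ c) :
    L ≤ pvBest1 pal i c := by
  induction c with
  | zero => omega
  | succ c ih =>
    simp only [pvBest1]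
    split
    · omega
    · rename_i h
      have : L ≠ c + 1 := by rintro rfl; exact h hL
      exact ih (by omega)

theorem pvBest1_spec (pal : List Char) (i c : Nat) :
    pvBest1 pal i c = 0 ∨ (pvPP pal i (pvBest1 pal i c) = true ∧ 1 ≤ pvBest1 pal i c) := by
  induction c with
  | zero => simp [pvBest1]
  | succ c ih =>
    simp only [pvBest1]
    split
    · rename_i h; exact Or.inr ⟨h, by omega⟩
    · exact ih

theorem pvBestFrom_le (pal : List Char) (i : Nat) : pvBestFrom pal i ≤ pal.length - i := by
  fun_induction pvBestFrom with
  | case1 i h ih =>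
    have h1 := pvBest1_le pal i (pal.length - i)
    omega
  | case2 i h => omega

theorem pvAInner_eq (pal : List Char) (n i mx : Nat) (hn : n = pal.length) (hi : i < n) :
    ∀ c j, j ≤ n - i → c = n - i - j → pvAInner pal n i c j mx = max mx (pvBest1 pal i c) := by
  intro c
  induction c generalizing mx with
  | zero =>
    intro j hj hc
    simp [pvAInner, pvBest1]
  | succ c ih =>
    intro j hj hc
    have hjlt : j < n - i := by omega
    have hslice : PySem.List.slice pal (some (i : Int)) (some ((n - j : Nat) : Int))
        = pvSeg pal i (c + 1) := by
      rw [PySem.List.slice_natCast]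
      simp only [pvSeg]
      congr 1
      omega
    have hlen : (pvSeg pal i (c + 1)).length = c + 1 := by
      simp only [pvSeg, List.length_take, List.length_drop]
      omega
    simp only [pvAInner, hjlt, if_true, hslice, hlen]
    by_cases hmx : mx < c + 1
    · simp only [hmx, if_true]
      by_cases hp : pvPP pal i (c + 1) = true
      · have : (pvSeg pal i (c + 1) == (pvSeg pal i (c + 1)).reverse) = true := hp
        simp only [this, if_true, pvBest1, hp]
        omega
      · have : (pvSeg pal i (c + 1) == (pvSeg pal i (c + 1)).reverse) = false := by
          simpa [pvPP] using hp
        simp only [this, Bool.false_eq_true, if_false]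
        rw [ih mx (j + 1) (by omega) (by omega)]
        simp only [pvBest1]
        rw [if_neg (by simpa using hp)]
    · simp only [hmx, if_false]
      have := pvBest1_le pal i (c + 1)
      omega

theorem pvAOuter_eq (pal : List Char) (n : Nat) (hn : n = pal.length) :
    ∀ k mx i, k = n - i → pvAOuter pal n k i mx = max mx (pvBestFrom pal i) := by
  subst hn
  intro k
  induction k with
  | zero =>
    intro mx i hk
    unfold pvBestFrom
    have h1 : ¬ i < pal.length := by omega
    simp [pvAOuter, h1]
  | succ k ih =>
    intro mx i hk
    have hi : i < pal.length := by omega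
    have hslice : (PySem.List.slice pal (some (i : Int)) (some ((pal.length : Nat) : Int))).length
        = pal.length - i := by
      rw [PySem.List.slice_natCast]
      simp only [List.length_take, List.length_drop]
      omega
    have hBF : pvBestFrom pal i
        = max (pvBest1 pal i (pal.length - i)) (pvBestFrom pal (i + 1)) := by
      rw [pvBestFrom]
      rw [if_pos hi]
    simp only [pvAOuter, hi, if_true, hslice]
    by_cases hmx : pal.length - i > mx
    · simp only [hmx, if_true]
      rw [pvAInner_eq pal pal.length i mx rfl hi (pal.length - i) 0 (by omega) (by omega)]
      rw [ih _ (i + 1) (by omega), hBF]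
      omega
    · simp only [hmx, if_false]
      have h1 := pvBestFrom_le pal i
      rw [hBF]
      have h2 := pvBest1_le pal i (pal.length - i)
      omega

-- B's while-loop computes pvBestLe
theorem pvBDescend_eq (pal : List Char) (L : Nat) :
    pvBDescend pal pal.length L = pvBestLe pal L := by
  induction L with
  | zero => simp [pvBDescend, pvBestLe]
  | succ L ih =>
    have hfun : (fun (i : Nat) =>
        let t := PySem.List.slice pal (some (i : Int)) (some ((i + (L + 1) : Nat) : Int))
        t == t.reverse)
        = (fun i => pvPP pal i (L + 1)) := by
      funext i
      show (PySem.List.slice pal (some (i : Int)) (some ((i + (L + 1) : Nat) : Int))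
          == (PySem.List.slice pal (some (i : Int)) (some ((i + (L + 1) : Nat) : Int))).reverse)
          = pvPP pal i (L + 1)
      have h : PySem.List.slice pal (some (i : Int)) (some ((i + (L + 1) : Nat) : Int))
          = pvSeg pal i (L + 1) := by
        rw [PySem.List.slice_natCast]
        simp only [pvSeg]
        congr 1
        omega
      rw [h]; rfl
    simp only [pvBDescend, hfun]
    simp only [pvBestLe]
    split
    · rfl
    · exact ih

theorem pvBestLe_ge (pal : List Char) (i L c : Nat) (h1 : 1 ≤ L) (h2 : i + L ≤ pal.length)
    (hp : pvPP pal i L = true) (hc : L ≤ c) : L ≤ pvBestLe pal c := by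
  induction c with
  | zero => omega
  | succ c ih =>
    simp only [pvBestLe]
    split
    · omega
    · rename_i h
      have hne : L ≠ c + 1 := by
        rintro rfl
        apply h
        rw [List.any_eq_true]
        exact ⟨i, List.mem_range.mpr (by omega), hp⟩
      exact ih (by omega)

theorem pvBestFrom_ge (pal : List Char) (i : Nat) (hi : i < pal.length) :
    ∀ d k, k ≤ i → d = i - k → pvBest1 pal i (pal.length - i) ≤ pvBestFrom pal k := by
  intro d
  induction d with
  | zero =>
    intro k hk hd
    have : k = i := by omega
    subst this
    rw [pvBestFrom, if_pos hi]
    exact le_max_left _ _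
  | succ d ih =>
    intro k hk hd
    rw [pvBestFrom, if_pos (by omega : k < pal.length)]
    exact le_trans (ih (k + 1) (by omega) (by omega)) (le_max_right _ _)

theorem pvBestLe_le_bestFrom (pal : List Char) (L : Nat) (hL : L ≤ pal.length) :
    pvBestLe pal L ≤ pvBestFrom pal 0 := by
  induction L with
  | zero => simp [pvBestLe]
  | succ L ih =>
    simp only [pvBestLe]
    split
    · rename_i h
      rw [List.any_eq_true] at h
      obtain ⟨i, hmem, hp⟩ := h
      rw [List.mem_range] at hmem
      have hi : i < pal.length := by omega
      calc L + 1 ≤ pvBest1 pal i (pal.length - i) :=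
              pvBest1_ge pal i (L + 1) (pal.length - i) hp (by omega)
        _ ≤ pvBestFrom pal 0 := pvBestFrom_ge pal i hi i 0 (by omega) (by omega)
    · exact ih (by omega)

theorem pvBestFrom_le_bestLe (pal : List Char) :
    ∀ i, pvBestFrom pal i ≤ pvBestLe pal pal.length := by
  intro i
  fun_induction pvBestFrom with
  | case1 i h ih =>
    apply max_le _ ih
    rcases pvBest1_spec pal i (pal.length - i) with h0 | ⟨hp, h1⟩
    · omega
    · have hle := pvBest1_le pal i (pal.length - i)
      exact pvBestLe_ge pal i _ pal.length h1 (by omega) hp (by omega)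
  | case2 i h => omega

-- per-rotation equality of the two loop bodies
theorem pvRotation_eq (pal : List Char) :
    pvAOuter pal pal.length pal.length 0 0 = pvBDescend pal pal.length pal.length := by
  rw [pvAOuter_eq pal pal.length rfl pal.length 0 0 (by omega)]
  rw [pvBDescend_eq]
  have h1 := pvBestLe_le_bestFrom pal pal.length le_rfl
  have h2 := pvBestFrom_le_bestLe pal 0
  omega

-- the two rotation strings are the same list
theorem pvPal_eq (cs : List Char) (y : Nat) (_hy : y < cs.length) :
    PySem.List.slice cs (some (y : Int)) (some ((cs.length : Nat) : Int)) ++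
      PySem.List.slice cs (some (0 : Int)) (some (y : Int))
    = PySem.List.slice cs (some (y : Int)) none ++ PySem.List.slice cs none (some (y : Int)) := by
  rw [PySem.List.slice_natCast, PySem.List.slice_from_natCast, PySem.List.slice_to_natCast]
  have h0 : PySem.List.slice cs (some (0 : Int)) (some (y : Int))
      = PySem.List.slice cs none (some (y : Int)) := by
    exact_mod_cast PySem.List.slice_zero_start cs (some (y : Int))
  rw [h0, PySem.List.slice_to_natCast]
  congr 1
  rw [List.take_of_length_le]
  simp

theorem pvLen_rot (cs : List Char) (y : Nat) (hy : y < cs.length) :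
    (PySem.List.slice cs (some (y : Int)) none ++ PySem.List.slice cs none (some (y : Int))).length
      = cs.length := by
  rw [PySem.List.slice_from_natCast, PySem.List.slice_to_natCast]
  simp only [List.length_append, List.length_drop, List.length_take]
  omega

-- ===== VERDICT (by name: the statement is the Claim_ definition above) =====
theorem circularPalindromes_spec : Claim_equal_circularPalindromes := by
  intro s _
  unfold Spec_circularPalindromes circularPalindromes circularPalindromes_alt
  simp only [List.map_inj_left, List.mem_range]
  intro y hy
  rw [pvPal_eq s.toList y hy]
  congr 1
  have hlen := pvLen_rot s.toList y hy
  rw [← hlen]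
  exact pvRotation_eq _
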